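-- pv_equiv track=rewrite | github.com/ujjwal-2706/COL215-Lab-Assignment | Software Assignment 3/kmap.py | break_literal
-- ===== SOURCE A (Python) =====
-- def break_literal(term):
--     answer = []
--     end_index = 0
--     while end_index < len(term):
--         start_index = end_index
--         end_index += 1
--         while end_index < len(term) and ord(term[end_index]) == 39 :
--             end_index += 1
--             break
--         new_literal = term[start_index:end_index]
--         answer.append(new_literal)
--     return answer
-- ===== SOURCE B (Python) =====
-- def break_literal(term):
--     answer = []
--     for c in term:
--         if c == "'" and answer and len(answer[-1]) == 1:
--             answer[-1] += c
--         else: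
--             answer.append(c)
--     return answer
-- ===== Notes on version B (the rewrite author's own statement) =====
-- stated objective: simpler
-- what changed: Replaces A's index-based outer while loop with slicing and an inner lookahead while by a single for-each pass that either extends the last one-character literal with a prime or appends a new one-character literal.
import Mathlib
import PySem

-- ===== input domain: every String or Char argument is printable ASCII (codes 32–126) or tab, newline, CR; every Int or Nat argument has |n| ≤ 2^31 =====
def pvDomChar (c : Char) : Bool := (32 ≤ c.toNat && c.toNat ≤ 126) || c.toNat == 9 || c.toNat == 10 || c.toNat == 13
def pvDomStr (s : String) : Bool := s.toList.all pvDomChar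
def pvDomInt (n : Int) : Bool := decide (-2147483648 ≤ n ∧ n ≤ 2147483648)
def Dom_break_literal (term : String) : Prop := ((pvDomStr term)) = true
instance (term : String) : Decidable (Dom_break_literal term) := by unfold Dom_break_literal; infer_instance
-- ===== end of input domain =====

-- B is a single append-or-extend pass over the characters instead of A's index/slice loop; objective: simpler.

-- ===== PORT A =====
-- outer while loop of A: state (end_index, answer); the inner 'while … break' consumes at
-- most one prime, transliterated as the one-step bump of end_index it performs.
def breakLoopA (s : List Char) (endIdx : Nat) (answer : List (List Char)) : List (List Char) :=
  if endIdx < s.length then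
    let startIdx := endIdx
    let e1 := endIdx + 1
    let e2 := if e1 < s.length ∧ PySem.List.pyGet? s (e1 : Int) = some '\'' then e1 + 1 else e1
    breakLoopA s e2 (answer ++ [PySem.List.slice s (some (startIdx : Int)) (some (e2 : Int))])
  else answer
termination_by s.length - endIdx
decreasing_by split_ifs <;> omega

def break_literal (term : String) : List String :=
  (breakLoopA term.toList 0 []).map String.ofList

-- ===== PORT B =====
-- for c in term: extend the last literal if it is a bare single char and c is a prime, else append [c]
def bStep (answer : List (List Char)) (c : Char) : List (List Char) :=
  if c = '\'' ∧ answer.getLast?.map List.length = some 1 then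
    answer.dropLast ++ [answer.getLast?.getD [] ++ [c]]
  else answer ++ [[c]]

def break_literal_alt (term : String) : List String :=
  (term.toList.foldl bStep []).map String.ofList

-- ===== PRECONDITION & SPEC =====
def Spec_break_literal (term : String) (out : List String) : Prop := out = break_literal_alt term
instance (term : String) (out : List String) : Decidable (Spec_break_literal term out) := by unfold Spec_break_literal; infer_instance

-- ===== CLAIM (what is proved, stated in full; the proofs are below) =====
def Claim_equal_break_literal : Prop := ∀ (term : String), Dom_break_literal term → Spec_break_literal term (break_literal term)

-- ===== LEMMAS AND PROOFS =====
-- common characterisation of the token list: a literal is one char plus an optional immediate prime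
def tok : List Char → List (List Char)
  | [] => []
  | c :: rest =>
    if rest.head? = some '\'' then [c, '\''] :: tok rest.tail
    else [c] :: tok rest
termination_by s => s.length
decreasing_by
  · simp only [List.length_tail, List.length_cons]; omega
  · simp only [List.length_cons]; omega

theorem loopA_eq_tok (s : List Char) (e : Nat) (answer : List (List Char)) :
    breakLoopA s e answer = answer ++ tok (s.drop e) := by
  induction hn : s.length - e using Nat.strong_induction_on generalizing e answer with
  | _ n ih =>
    unfold breakLoopA
    by_cases he : e < s.length
    · simp only [he, if_true]
      have hdrop : s.drop e = s[e] :: s.drop (e + 1) := List.drop_eq_getElem_cons he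
      by_cases hp : e + 1 < s.length ∧ PySem.List.pyGet? s ((e + 1 : Nat) : Int) = some '\''
      · -- prime consumed: token of two chars
        obtain ⟨h1, h2⟩ := hp
        have hget : s[e+1] = '\'' := by
          have h2' := h2
          simp only [PySem.List.pyGet?_natCast] at h2'
          simpa [List.getElem?_eq_getElem h1] using h2'
        have hdrop1 : s.drop (e + 1) = s[e+1] :: s.drop (e + 2) := List.drop_eq_getElem_cons h1
        simp only [h1, h2, and_self, if_true]
        have hslice : PySem.List.slice s (some (e : Int)) (some ((e + 1 + 1 : Nat) : Int))
            = [s[e], '\''] := by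
          have hc : ((e + 1 + 1 : Nat) : Int) = ((e : Int) + ((2 : Nat) : Int)) := by push_cast; ring
          rw [hc, PySem.List.slice_natCast_add]
          rw [show s.drop e = s[e] :: s[e+1] :: s.drop (e+2) by rw [hdrop, hdrop1], hget]
          rfl
        rw [hslice, ih (s.length - (e + 2)) (by omega) (e + 2) _ rfl]
        rw [hdrop, hdrop1, hget, show e + 1 + 1 = e + 2 from rfl]
        rw [tok, if_pos (by simp)]
        simp
      · -- single-char token
        simp only [hp, if_false]
        have hslice : PySem.List.slice s (some (e : Int)) (some ((e + 1 : Nat) : Int)) = [s[e]] := by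
          have hc : ((e + 1 : Nat) : Int) = ((e : Int) + ((1 : Nat) : Int)) := by push_cast; ring
          rw [hc, PySem.List.slice_natCast_add, hdrop]
          rfl
        rw [hslice, ih (s.length - (e + 1)) (by omega) (e + 1) _ rfl]
        have hhead : (s.drop (e + 1)).head? ≠ some '\'' := by
          intro hcontra
          by_cases h1 : e + 1 < s.length
          · have hdrop1 : s.drop (e + 1) = s[e+1] :: s.drop (e + 2) := List.drop_eq_getElem_cons h1
            rw [hdrop1] at hcontra
            simp only [List.head?_cons, Option.some.injEq] at hcontra
            refine hp ⟨h1, ?_⟩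
            rw [PySem.List.pyGet?_natCast, List.getElem?_eq_getElem h1, hcontra]
          · rw [List.drop_eq_nil_of_le (by omega)] at hcontra
            simp at hcontra
        rw [hdrop, tok, if_neg hhead]
        simp
    · simp only [he, if_false]
      rw [List.drop_eq_nil_of_le (by omega)]
      simp [tok]

theorem foldB_eq_tok (s : List Char) :
    ∀ answer : List (List Char),
      ¬ (s.head? = some '\'' ∧ answer.getLast?.map List.length = some 1) →
      List.foldl bStep answer s = answer ++ tok s := by
  induction s using tok.induct with
  | case1 => intro answer _; simp [tok]
  | case2 c rest hhead ih =>
    intro answer h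
    cases rest with
    | nil => simp at hhead
    | cons d rs =>
      simp only [List.head?_cons, Option.some.injEq] at hhead
      subst hhead
      simp only [List.tail_cons] at ih
      have hstep1 : bStep answer c = answer ++ [[c]] := by
        unfold bStep
        rw [if_neg]
        rintro ⟨hc, hl⟩
        exact h ⟨by simp [hc], hl⟩
      have hstep2 : bStep (answer ++ [[c]]) '\'' = answer ++ [[c, '\'']] := by
        unfold bStep
        rw [if_pos (by simp)]
        simp
      rw [List.foldl_cons, hstep1, List.foldl_cons, hstep2,
        ih (answer ++ [[c, '\'']]) (by simp)]
      rw [tok, if_pos (by simp)]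
      simp
  | case3 c rest hhead ih =>
    intro answer h
    have hstep1 : bStep answer c = answer ++ [[c]] := by
      unfold bStep
      rw [if_neg]
      rintro ⟨hc, hl⟩
      exact h ⟨by simp [hc], hl⟩
    rw [List.foldl_cons, hstep1, ih (answer ++ [[c]]) (by rintro ⟨h1, _⟩; exact hhead h1)]
    rw [tok, if_neg hhead]
    simp

-- ===== VERDICT (by name: the statement is the Claim_ definition above) =====
theorem break_literal_spec : Claim_equal_break_literal := by
  intro term _
  unfold Spec_break_literal break_literal break_literal_alt
  rw [loopA_eq_tok, foldB_eq_tok _ _ (by simp)]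
  simp
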